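-- pv_equiv track=rewrite | github.com/hideyk/Challenges | leetcode/7. countConsistentStrings/countConsistentStrings.py | efficientCountConsistentStrings
-- ===== SOURCE A (Python) =====
-- from typing import List
--
-- def efficientCountConsistentStrings(allowed: str, words: List[str]) -> int:
--         incomp = 0
--         sett = set(allowed)
--         for word in words:
--             for c in word:
--                 if(c not in sett):
--                     incomp+=1
--                     break
--         return len(words) - incomp
-- ===== SOURCE B (Python) =====
-- from typing import List
--
-- def efficientCountConsistentStrings(allowed: str, words: List[str]) -> int:
--     am = 0
--     for c in allowed:
--         am |= 1 << ord(c)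
--     count = 0
--     for word in words:
--         wm = 0
--         for c in word:
--             wm |= 1 << ord(c)
--         if wm | am == am:
--             count += 1
--     return count
-- ===== Notes on version B (the rewrite author's own statement) =====
-- stated objective: alternative
-- what changed: Replaces A's hash-set membership with integer bitmasks: each word is folded into a bitmask of its character codes and consistency is a single whole-mask test (wm | am) == am, counting consistent words directly instead of subtracting an incompatible counter with an early-break scan.
import Mathlib
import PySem

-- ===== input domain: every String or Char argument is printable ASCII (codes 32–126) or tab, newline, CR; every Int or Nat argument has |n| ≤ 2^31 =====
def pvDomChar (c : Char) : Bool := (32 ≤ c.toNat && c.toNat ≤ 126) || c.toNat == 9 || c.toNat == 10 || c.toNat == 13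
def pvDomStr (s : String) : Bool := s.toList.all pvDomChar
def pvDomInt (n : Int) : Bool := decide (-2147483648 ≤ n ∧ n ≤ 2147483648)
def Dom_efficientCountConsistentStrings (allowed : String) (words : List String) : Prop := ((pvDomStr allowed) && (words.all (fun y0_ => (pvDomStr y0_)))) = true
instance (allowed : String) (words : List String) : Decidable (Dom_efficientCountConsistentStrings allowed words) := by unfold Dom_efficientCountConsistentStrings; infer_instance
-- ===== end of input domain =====

-- B replaces A's hash-set with integer bitmasks (word mask folded by OR, one whole-mask
-- test (wm | am) == am) and counts consistent words directly; objective: alternative.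

-- ===== PORT A =====
-- inner 'for c in word: if c not in sett: incomp += 1; break' (contribution to incomp)
def pvAWordIncomp (sett : PySem.Set Char) : List Char → Int
  | [] => 0
  | c :: rest => if PySem.Set.contains sett c then pvAWordIncomp sett rest else 1

def efficientCountConsistentStrings (allowed : String) (words : List String) : Int :=
  let sett := PySem.Set.ofList allowed.toList
  let incomp := words.foldl (fun incomp word => incomp + pvAWordIncomp sett word.toList) 0
  (words.length : Int) - incomp

-- ===== PORT B =====
-- 'for c in s: m |= 1 << ord(c)' (mask of a string's character codes)
def pvMaskOf (cs : List Char) : Nat := cs.foldl (fun m c => m ||| (1 <<< c.toNat)) 0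

def efficientCountConsistentStrings_alt (allowed : String) (words : List String) : Int :=
  let am := pvMaskOf allowed.toList
  words.foldl (fun count word =>
    if pvMaskOf word.toList ||| am = am then count + 1 else count) 0

-- ===== PRECONDITION & SPEC =====
def Spec_efficientCountConsistentStrings (allowed : String) (words : List String) (out : Int) : Prop := out = efficientCountConsistentStrings_alt allowed words
instance (allowed : String) (words : List String) (out : Int) : Decidable (Spec_efficientCountConsistentStrings allowed words out) := by unfold Spec_efficientCountConsistentStrings; infer_instance

-- ===== CLAIM (what is proved, stated in full; the proofs are below) =====
def Claim_equal_efficientCountConsistentStrings : Prop := ∀ (allowed : String) (words : List String), Dom_efficientCountConsistentStrings allowed words → Spec_efficientCountConsistentStrings allowed words (efficientCountConsistentStrings allowed words)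

-- ===== LEMMAS AND PROOFS =====

theorem pv_testBit_foldl (cs : List Char) (m : Nat) (k : Nat) :
    (cs.foldl (fun m c => m ||| (1 <<< c.toNat)) m).testBit k
      = (m.testBit k || cs.any (fun c => c.toNat == k)) := by
  induction cs generalizing m with
  | nil => simp
  | cons c rest ih =>
    rw [List.foldl_cons, ih]
    simp only [Nat.testBit_or, Nat.shiftLeft_eq, one_mul, Nat.testBit_two_pow, List.any_cons]
    cases hm : m.testBit k <;> cases hr : rest.any (fun c => c.toNat == k) <;>
      cases hc2 : (c.toNat == k) <;> simp_all

theorem pv_testBit_maskOf (cs : List Char) (k : Nat) :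
    (pvMaskOf cs).testBit k = cs.any (fun c => c.toNat == k) := by
  simpa using pv_testBit_foldl cs 0 k

-- the whole-mask test equals character-wise membership
theorem pv_mask_subset (w al : List Char) :
    pvMaskOf w ||| pvMaskOf al = pvMaskOf al ↔ w.all (fun c => al.contains c) = true := by
  constructor
  · intro h
    simp only [List.all_eq_true, List.contains_iff_mem]
    intro c hc
    have hw : (pvMaskOf w).testBit c.toNat = true := by
      rw [pv_testBit_maskOf]
      simp only [List.any_eq_true, beq_iff_eq]
      exact ⟨c, hc, rfl⟩
    have hb : (pvMaskOf al).testBit c.toNat = true := by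
      have h2 := congrArg (fun n => n.testBit c.toNat) h
      simp only [Nat.testBit_or, hw, Bool.true_or] at h2
      exact h2.symm
    rw [pv_testBit_maskOf] at hb
    simp only [List.any_eq_true, beq_iff_eq] at hb
    obtain ⟨d, hd, hde⟩ := hb
    have hdc : d = c := Char.ext (UInt32.toNat_inj.mp hde)
    exact hdc ▸ hd
  · intro h
    simp only [List.all_eq_true, List.contains_iff_mem] at h
    apply Nat.eq_of_testBit_eq
    intro k
    rw [Nat.testBit_or, pv_testBit_maskOf]
    cases hw : w.any (fun c => c.toNat == k) with
    | false => simp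
    | true =>
      simp only [List.any_eq_true, beq_iff_eq] at hw
      obtain ⟨c, hc, hck⟩ := hw
      have hal : (pvMaskOf al).testBit k = true := by
        rw [pv_testBit_maskOf]
        simp only [List.any_eq_true, beq_iff_eq]
        exact ⟨c, h c hc, hck⟩
      simp [hal]

-- A's inner early-break loop returns 0 exactly when every character is allowed
theorem pvAWordIncomp_eq (al : List Char) (cs : List Char) :
    pvAWordIncomp (PySem.Set.ofList al) cs
      = if cs.all (fun c => al.contains c) then 0 else 1 := by
  induction cs with
  | nil => simp [pvAWordIncomp]
  | cons c rest ih =>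
    by_cases hc : c ∈ al
    · have h1 : PySem.Set.contains (PySem.Set.ofList al) c = true := by
        simp [PySem.Set.contains, PySem.Set.mem_ofList, hc]
      simp [pvAWordIncomp, ih, List.all_cons, hc]
    · have h1 : PySem.Set.contains (PySem.Set.ofList al) c = false := by
        simp [PySem.Set.contains, PySem.Set.mem_ofList, hc]
      simp [pvAWordIncomp, h1, hc]

-- B's counting loop as a sum of indicators
theorem pv_foldl_count (p : String → Prop) [DecidablePred p] (ws : List String) (a : Int) :
    ws.foldl (fun count word => if p word then count + 1 else count) a
      = a + (ws.map (fun word => if p word then (1:Int) else 0)).sum := by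
  induction ws generalizing a with
  | nil => simp
  | cons w rest ih =>
    simp only [List.foldl_cons, List.map_cons, List.sum_cons, ih]
    by_cases h : p w <;> simp [h] <;> ring

-- len(words) - incompatible count = B's direct count of consistent words
theorem pv_counts (al : List Char) (ws : List String) :
    (ws.length : Int)
        - ws.foldl (fun incomp word => incomp + pvAWordIncomp (PySem.Set.ofList al) word.toList) 0
      = ws.foldl (fun count word =>
          if pvMaskOf word.toList ||| pvMaskOf al = pvMaskOf al then count + 1 else count) 0 := by
  rw [PySem.List.foldl_add ws (fun word => pvAWordIncomp (PySem.Set.ofList al) word.toList) 0,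
      pv_foldl_count (fun word => pvMaskOf word.toList ||| pvMaskOf al = pvMaskOf al) ws 0]
  simp only [pvAWordIncomp_eq]
  induction ws with
  | nil => simp
  | cons w rest ih =>
    simp only [List.map_cons, List.sum_cons, List.length_cons]
    by_cases h : w.toList.all (fun c => al.contains c) = true
    · rw [if_pos h, if_pos ((pv_mask_subset w.toList al).mpr h)]
      push_cast
      omega
    · rw [if_neg h, if_neg (fun hc => h ((pv_mask_subset w.toList al).mp hc))]
      push_cast
      omega

-- ===== VERDICT (by name: the statement is the Claim_ definition above) =====
theorem efficientCountConsistentStrings_spec : Claim_equal_efficientCountConsistentStrings := by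
  intro allowed words _
  unfold Spec_efficientCountConsistentStrings efficientCountConsistentStrings efficientCountConsistentStrings_alt
  exact pv_counts allowed.toList words
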